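-- pv_equiv track=rewrite | github.com/stat17-hb/sector-rotation | src/data_sources/krx_indices.py | _normalize_requested_codes
-- ===== SOURCE A (Python) =====
-- STALE_INDEX_CODE_REPLACEMENTS: dict[str, str] = {
--     "5041": "5049",
--     "1166": "1157",
-- }
--
-- def _normalize_requested_codes(
--     index_codes: list[str],
-- ) -> tuple[list[str], list[tuple[str, str]]]:
--     """Apply stale-code replacements and remove duplicates (stable order)."""
--     normalized: list[str] = []
--     replacements: list[tuple[str, str]] = []
--     seen_codes: set[str] = set()
--     seen_replacements: set[tuple[str, str]] = set()
--
--     for raw_code in index_codes: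
--         code = str(raw_code)
--         mapped = STALE_INDEX_CODE_REPLACEMENTS.get(code, code)
--         replacement_pair = (code, mapped)
--         if code != mapped and replacement_pair not in seen_replacements:
--             replacements.append(replacement_pair)
--             seen_replacements.add(replacement_pair)
--         if mapped not in seen_codes:
--             normalized.append(mapped)
--             seen_codes.add(mapped)
--
--     return normalized, replacements
-- ===== SOURCE B (Python) =====
-- STALE_INDEX_CODE_REPLACEMENTS: dict[str, str] = {
--     "5041": "5049",
--     "1166": "1157",
-- }
--
--
-- def _normalize_requested_codes(
--     index_codes: list[str],
-- ) -> tuple[list[str], list[tuple[str, str]]]: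
--     """Apply stale-code replacements and remove duplicates (stable order).
--
--     Staged passes, dedup by prefix scan: an element is kept iff it does not
--     occur earlier in the mapped list -- no seen-sets, no dicts for dedup."""
--     mapped = [STALE_INDEX_CODE_REPLACEMENTS.get(str(c), str(c)) for c in index_codes]
--     normalized = [m for i, m in enumerate(mapped) if m not in mapped[:i]]
--     pairs = [(str(c), m) for c, m in zip(index_codes, mapped) if m != str(c)]
--     replacements = [p for i, p in enumerate(pairs) if p not in pairs[:i]]
--     return normalized, replacements
-- ===== Notes on version B (the rewrite author's own statement) =====
-- stated objective: alternative
-- what changed: Replaces the single interleaved loop with two tracking sets by staged passes in which deduplication is done with no auxiliary structure at all: an element is kept iff it is absent from the prefix of already-seen mapped values (m not in mapped[:i]), trading O(n) set lookups for prefix scans.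
import Mathlib
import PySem

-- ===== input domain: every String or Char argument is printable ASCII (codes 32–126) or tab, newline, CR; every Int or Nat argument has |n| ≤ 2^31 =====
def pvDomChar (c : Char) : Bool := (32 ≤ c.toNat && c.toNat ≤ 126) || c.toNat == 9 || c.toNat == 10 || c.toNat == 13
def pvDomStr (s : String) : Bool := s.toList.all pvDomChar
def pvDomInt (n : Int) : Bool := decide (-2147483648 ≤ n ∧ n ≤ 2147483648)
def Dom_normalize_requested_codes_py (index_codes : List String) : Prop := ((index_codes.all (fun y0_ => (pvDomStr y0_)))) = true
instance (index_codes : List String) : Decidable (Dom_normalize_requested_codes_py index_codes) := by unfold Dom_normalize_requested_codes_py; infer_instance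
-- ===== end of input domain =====

-- B replaces A's single interleaved loop with two seen-sets by staged passes
-- whose dedup is a prefix-membership scan (m not in mapped[:i]); objective: alternative.


-- STALE_INDEX_CODE_REPLACEMENTS (module constant, shared by both ports)
def staleIndexCodeReplacements : PySem.Dict String String :=
  PySem.Dict.ofList [("5041", "5049"), ("1166", "1157")]

-- ===== PORT A =====
-- A's loop body over the state (normalized, replacements, seen_codes, seen_replacements)
def pvStepA (st : List String × List (String × String) × PySem.Set String × PySem.Set (String × String))
    (raw_code : String) :
    List String × List (String × String) × PySem.Set String × PySem.Set (String × String) :=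
  let code := raw_code   -- str(raw_code) on a str is the string itself
  let mapped := staleIndexCodeReplacements.getD code code
  let replacement_pair := (code, mapped)
  let st :=
    if code ≠ mapped ∧ ¬ PySem.Set.contains st.2.2.2 replacement_pair then
      (st.1, st.2.1 ++ [replacement_pair], st.2.2.1, PySem.Set.add st.2.2.2 replacement_pair)
    else st
  if ¬ PySem.Set.contains st.2.2.1 mapped then
    (st.1 ++ [mapped], st.2.1, PySem.Set.add st.2.2.1 mapped, st.2.2.2)
  else st

def normalize_requested_codes_py (index_codes : List String) : List String × (List (String × String)) :=
  let st := index_codes.foldl pvStepA ([], [], PySem.Set.empty, PySem.Set.empty)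
  (st.1, st.2.1)

-- ===== PORT B =====
-- B's prefix-scan dedup: [x for i, x in enumerate(xs) if x not in xs[:i]]
def pvKeepFirst {α : Type} [BEq α] (xs : List α) : List α :=
  (PySem.List.enumerate xs).filterMap
    (fun p => if (xs.take p.1.toNat).contains p.2 then none else some p.2)

-- staged passes: map, prefix-scan dedup; zip-filter pairs, prefix-scan dedup
def normalize_requested_codes_py_alt (index_codes : List String) : List String × (List (String × String)) :=
  let mapped := index_codes.map (fun c => staleIndexCodeReplacements.getD c c)
  let normalized := pvKeepFirst mapped
  let pairs := (index_codes.zip mapped).filterMap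
    (fun p => if p.2 ≠ p.1 then some (p.1, p.2) else none)
  let replacements := pvKeepFirst pairs
  (normalized, replacements)

-- ===== PRECONDITION & SPEC =====
def Spec_normalize_requested_codes_py (index_codes : List String) (out : List String × (List (String × String))) : Prop := out = normalize_requested_codes_py_alt index_codes
instance (index_codes : List String) (out : List String × (List (String × String))) : Decidable (Spec_normalize_requested_codes_py index_codes out) := by unfold Spec_normalize_requested_codes_py; infer_instance

-- ===== CLAIM (what is proved, stated in full; the proofs are below) =====
def Claim_equal_normalize_requested_codes_py : Prop := ∀ (index_codes : List String), Dom_normalize_requested_codes_py index_codes → Spec_normalize_requested_codes_py index_codes (normalize_requested_codes_py index_codes)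

-- ===== LEMMAS AND PROOFS =====

-- one step of A's loop on a "diagonal" state (seen_codes = normalized, seen_replacements = replacements)
theorem pvStepA_diag (norm : List String) (reps : List (String × String)) (c : String) :
    pvStepA (norm, reps, norm, reps) c
    = (PySem.Set.add norm (staleIndexCodeReplacements.getD c c),
       (if staleIndexCodeReplacements.getD c c = c then reps else PySem.Set.add reps (c, staleIndexCodeReplacements.getD c c)),
       PySem.Set.add norm (staleIndexCodeReplacements.getD c c),
       (if staleIndexCodeReplacements.getD c c = c then reps else PySem.Set.add reps (c, staleIndexCodeReplacements.getD c c))) := by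
  rcases eq_or_ne (staleIndexCodeReplacements.getD c c) c with h1 | h1
  · by_cases h3 : c ∈ norm <;>
      simp [pvStepA, PySem.Set.add, PySem.Set.contains, h1, h3]
  · by_cases h2 : (c, staleIndexCodeReplacements.getD c c) ∈ reps <;>
      by_cases h3 : staleIndexCodeReplacements.getD c c ∈ norm <;>
      simp [pvStepA, PySem.Set.add, PySem.Set.contains, h1, Ne.symm h1, h2, h3]

-- A's loop keeps the state diagonal; each component is an independent Set.add fold
theorem pvLoopA (cs : List String) (norm : List String) (reps : List (String × String)) :
    cs.foldl pvStepA (norm, reps, norm, reps)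
    = (cs.foldl (fun a c => PySem.Set.add a (staleIndexCodeReplacements.getD c c)) norm,
       cs.foldl (fun a c => if staleIndexCodeReplacements.getD c c = c then a else PySem.Set.add a (c, staleIndexCodeReplacements.getD c c)) reps,
       cs.foldl (fun a c => PySem.Set.add a (staleIndexCodeReplacements.getD c c)) norm,
       cs.foldl (fun a c => if staleIndexCodeReplacements.getD c c = c then a else PySem.Set.add a (c, staleIndexCodeReplacements.getD c c)) reps) := by
  induction cs generalizing norm reps with
  | nil => rfl
  | cons c cs ih => rw [List.foldl_cons, pvStepA_diag, ih]; rfl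

-- prefix-scan dedup keeps exactly the first occurrences: it is PySem.Set.ofList
theorem pvKeepFirst_eq_ofList {α : Type} [BEq α] [LawfulBEq α] (xs : List α) :
    pvKeepFirst xs = PySem.Set.ofList xs := by
  induction xs using List.reverseRecOn with
  | nil => rfl
  | append_singleton ys x ih =>
    unfold pvKeepFirst at ih ⊢
    rw [PySem.List.enumerate_append, List.filterMap_append, PySem.Set.ofList_append_singleton]
    have htake : ∀ p ∈ PySem.List.enumerate ys 0, ((ys ++ [x]).take p.1.toNat).contains p.2 ↔ (ys.take p.1.toNat).contains p.2 := by
      intro p hp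
      rw [PySem.List.mem_enumerate_iff] at hp
      obtain ⟨k, hk, rfl⟩ := hp
      rw [List.take_append_of_le_length (by simpa using Nat.le_of_lt hk)]
    have h1 : (PySem.List.enumerate ys 0).filterMap
        (fun p => if ((ys ++ [x]).take p.1.toNat).contains p.2 then none else some p.2)
        = (PySem.List.enumerate ys 0).filterMap
        (fun p => if (ys.take p.1.toNat).contains p.2 then none else some p.2) := by
      apply List.filterMap_congr
      intro p hp
      have h := htake p hp
      simp only [List.contains_iff_mem] at h
      simp [h]
    rw [h1, ih]
    have hlen : ((0 : Int) + ys.length).toNat = ys.length := by simp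
    rw [show PySem.List.enumerate [x] (0 + (ys.length : Int)) = [((0 + (ys.length : Int)), x)] by
      rw [PySem.List.enumerate_cons, PySem.List.enumerate_nil]]
    rw [List.filterMap_cons]
    simp only [hlen, show (ys ++ [x]).take ys.length = ys from by simp]
    by_cases hx : x ∈ ys <;>
      simp [PySem.Set.add, PySem.Set.contains, PySem.Set.mem_ofList, hx]

-- zip-with-map filterMap collapses to a single filterMap over cs
theorem pvZipPairs (cs : List String) :
    ((cs.zip (cs.map (fun c => staleIndexCodeReplacements.getD c c))).filterMap
      (fun p => if p.2 ≠ p.1 then some (p.1, p.2) else none))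
    = cs.filterMap (fun c =>
        if staleIndexCodeReplacements.getD c c ≠ c then some (c, staleIndexCodeReplacements.getD c c) else none) := by
  induction cs with
  | nil => rfl
  | cons c cs ih => simp only [List.map_cons, List.zip_cons_cons, List.filterMap_cons, ih]

-- folding Set.add over the conditional filterMap is A's conditional Set.add fold
theorem pvFilterFold (cs : List String) (reps : List (String × String)) :
    PySem.Set.update reps (cs.filterMap (fun c =>
      if staleIndexCodeReplacements.getD c c ≠ c then some (c, staleIndexCodeReplacements.getD c c) else none))
    = cs.foldl (fun a c => if staleIndexCodeReplacements.getD c c = c then a else PySem.Set.add a (c, staleIndexCodeReplacements.getD c c)) reps := by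
  induction cs generalizing reps with
  | nil => rfl
  | cons c cs ih =>
    by_cases h : staleIndexCodeReplacements.getD c c = c
    · simpa [h] using ih reps
    · simpa [h, PySem.Set.update_cons] using ih (PySem.Set.add reps (c, staleIndexCodeReplacements.getD c c))

theorem normalize_requested_codes_py_spec : Claim_equal_normalize_requested_codes_py := by
  intro index_codes _
  unfold Spec_normalize_requested_codes_py normalize_requested_codes_py normalize_requested_codes_py_alt
  rw [show List.foldl pvStepA ([], [], PySem.Set.empty, PySem.Set.empty) index_codes
      = List.foldl pvStepA (([] : List String), ([] : List (String × String)),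
          ([] : List String), ([] : List (String × String))) index_codes from rfl,
    pvLoopA]
  simp only [pvKeepFirst_eq_ofList, pvZipPairs, Prod.mk.injEq]
  constructor
  · rw [PySem.Set.ofList_eq_foldl, List.foldl_map]
  · exact ((PySem.Set.update_nil_left _).symm.trans (pvFilterFold index_codes [])).symm
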